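-- pv_equiv track=rewrite | github.com/Ritvik19/CodeBook | data/HackerRank-ProblemSolving/Manasa and Stones.py | stones
-- ===== SOURCE A (Python) =====
-- def stones(n, a, b):
--     n = n - 1
--     min_ = min(a, b)
--     max_ = max(a, b)
--     result = [min_ * n]
--     maxi = max_ * n
--     diff = max_ - min_
--
--     while result[- 1] < maxi:
--         result.append(result[- 1] + diff)
--
--     return result;
-- ===== SOURCE B (Python) =====
-- def stones(n, a, b):
--     m = n - 1
--     return sorted({a * i + b * (m - i) for i in range(m + 1)})
-- ===== Notes on version B (the rewrite author's own statement) =====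
-- stated objective: alternative
-- what changed: Replaces A's grow-the-progression-until-it-reaches-the-maximum loop with the combinatorial enumeration of all i-vs-(m-i) step splits a*i + b*(m-i), deduplicated with a set and sorted; Pre_ restricts to the problem's natural domain n >= 1 (at least one stone), since for n <= 0 A's single value min(a,b)*(n-1) comes from negative-count arithmetic that B's enumeration has no counterpart for.
-- outside the precondition, e.g. on stones(0, 2, 3): A returns [-2], B returns []; on stones(-3, 5, 5): A returns [-20], B returns []
import Mathlib
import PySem

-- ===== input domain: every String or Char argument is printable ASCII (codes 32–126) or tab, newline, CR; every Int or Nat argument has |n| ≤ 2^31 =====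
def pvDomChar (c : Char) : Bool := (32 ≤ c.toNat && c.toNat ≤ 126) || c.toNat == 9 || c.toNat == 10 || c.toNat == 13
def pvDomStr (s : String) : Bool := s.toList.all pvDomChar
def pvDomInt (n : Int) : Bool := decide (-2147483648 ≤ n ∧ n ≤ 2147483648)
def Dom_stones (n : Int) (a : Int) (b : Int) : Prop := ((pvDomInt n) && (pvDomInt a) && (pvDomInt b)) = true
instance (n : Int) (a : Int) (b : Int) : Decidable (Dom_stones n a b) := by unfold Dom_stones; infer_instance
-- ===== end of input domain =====

-- B replaces A's grow-until-the-maximum progression loop by the combinatorial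
-- enumeration of all step splits a*i + b*(m-i), deduplicated with a set and sorted
-- (objective: alternative algorithm of similar cost).

-- ===== PORT A =====
-- while result[-1] < maxi: result.append(result[-1] + diff)
-- (the 0 < diff conjunct only makes the recursion total: in every call from
-- `stones`, diff = 0 forces last = maxi, so it never changes the result)
-- acc holds the result list reversed (cons = Python's O(1) append); reversed on exit
def stonesLoop (maxi diff last : Int) (acc : List Int) : List Int :=
  if _h : last < maxi ∧ 0 < diff then
    stonesLoop maxi diff (last + diff) ((last + diff) :: acc)
  else acc.reverse
termination_by (maxi - last).toNat
decreasing_by omega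

def stones (n : Int) (a : Int) (b : Int) : List Int :=
  let n' := n - 1
  let min_ := min a b
  let max_ := max a b
  let first := min_ * n'
  stonesLoop (max_ * n') (max_ - min_) first [first]

-- ===== PORT B =====
-- sorted({a * i + b * (m - i) for i in range(m + 1)})
def stones_alt (n : Int) (a : Int) (b : Int) : List Int :=
  let m := n - 1
  PySem.List.sorted
    (PySem.Set.ofList ((PySem.List.pyRange 0 (m + 1) 1).map (fun i => a * i + b * (m - i))))
    (fun x => x)

-- ===== PRECONDITION & SPEC =====
-- Pre_ restricts to the problem's natural domain n ≥ 1 (at least one stone): for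
-- n ≤ 0 A's single value min(a,b)*(n-1) is an artefact of negative-count
-- arithmetic, while B's enumeration of the zero available steps yields [].
def Pre_stones (n : Int) (a : Int) (b : Int) : Prop := 1 ≤ n
instance (n : Int) (a : Int) (b : Int) : Decidable (Pre_stones n a b) := by unfold Pre_stones; infer_instance

def pvWitness_stones : Int × Int × Int := (3, 2, 5)

def Spec_stones (n : Int) (a : Int) (b : Int) (out : List Int) : Prop := out = stones_alt n a b
instance (n : Int) (a : Int) (b : Int) (out : List Int) : Decidable (Spec_stones n a b out) := by unfold Spec_stones; infer_instance

-- ===== CLAIM (what is proved, stated in full; the proofs are below) =====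
def Claim_equal_stones : Prop := ∀ (n : Int) (a : Int) (b : Int), Dom_stones n a b → Pre_stones n a b → Spec_stones n a b (stones n a b)

-- ===== LEMMAS AND PROOFS =====

-- the common normal form both ports are reduced to: the arithmetic progression
def prog (n : Int) (a : Int) (b : Int) : List Int :=
  let m := n - 1
  let lo := min a b
  let d := max a b - lo
  (List.range (if 0 < d ∧ 0 < m then m.toNat + 1 else 1)).map (fun i : Nat => lo * m + (i : Int) * d)

theorem stonesLoop_stop (maxi d last : Int) (acc : List Int)
    (h : ¬(last < maxi ∧ 0 < d)) : stonesLoop maxi d last acc = acc.reverse := by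
  rw [stonesLoop]; simp [h]

theorem stonesLoop_eq (k : Nat) : ∀ (d last : Int) (acc : List Int), 0 < d →
    stonesLoop (last + (k : Int) * d) d last acc
      = acc.reverse ++ (List.range k).map (fun i : Nat => last + ((i : Int) + 1) * d) := by
  induction k with
  | zero =>
    intro d last acc hd
    rw [stonesLoop_stop]
    · simp
    · intro h; omega
  | succ k ih =>
    intro d last acc hd
    have hlt : last < last + ((k : Int) + 1) * d := by nlinarith [Int.natCast_nonneg k]
    have hcond : last < last + ((k + 1 : Nat) : Int) * d ∧ 0 < d := by
      push_cast; exact ⟨hlt, hd⟩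
    rw [stonesLoop, dif_pos hcond]
    have hm2 : last + ((k + 1 : Nat) : Int) * d = (last + d) + (k : Int) * d := by
      push_cast; ring
    rw [hm2, ih d (last + d) ((last + d) :: acc) hd, List.reverse_cons, List.append_assoc]
    rw [List.range_succ_eq_map, List.map_cons, List.map_map, List.singleton_append]
    congr 1
    congr 1
    · norm_num
    · apply List.map_congr_left
      intro i _
      simp only [Function.comp_apply]
      push_cast
      ring

-- A reduces to the progression normal form (for every n)
theorem stones_eq_prog (n a b : Int) : stones n a b = prog n a b := by
  unfold stones prog
  simp only []
  set m := n - 1 with hm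
  set lo := min a b with hlo
  set hi := max a b with hhi
  set d := hi - lo with hd
  by_cases hc : 0 < d ∧ 0 < m
  · obtain ⟨hdp, hmp⟩ := hc
    have hmax : hi * m = lo * m + (m.toNat : Int) * d := by
      have h1 : (m.toNat : Int) = m := by omega
      rw [h1, hd]; ring
    rw [hmax, stonesLoop_eq m.toNat d (lo * m) [lo * m] hdp, List.reverse_singleton]
    rw [if_pos ⟨hdp, hmp⟩, List.range_succ_eq_map, List.map_cons, List.map_map,
      List.singleton_append]
    congr 1
    norm_num
  · have hstop : ¬(lo * m < hi * m ∧ 0 < d) := by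
      by_cases hdp : 0 < d
      · have hmle : m ≤ 0 := by omega
        have : hi * m ≤ lo * m := by nlinarith
        intro h; omega
      · intro h; omega
    rw [stonesLoop_stop _ _ _ _ hstop, if_neg hc]
    simp

-- foldl over Set.add leaves the accumulator unchanged on already-present elements
theorem foldl_add_mem (x : Int) : ∀ (l : List Int), (∀ y ∈ l, y = x) →
    List.foldl PySem.Set.add [x] l = [x] := by
  intro l
  induction l with
  | nil => intro _; rfl
  | cons z t ih =>
    intro h
    have hz : z = x := h z (by simp)
    have hadd : PySem.Set.add [x] z = [x] := by
      simp [PySem.Set.add, PySem.Set.contains, hz]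
    rw [List.foldl_cons, hadd]
    exact ih (fun y hy => h y (by simp [hy]))

-- Set.ofList of a duplicate-free list is the list itself
theorem foldl_add_nodup : ∀ (l : List Int) (s : List Int), l.Nodup →
    (∀ y ∈ l, y ∉ s) → List.foldl PySem.Set.add s l = s ++ l := by
  intro l
  induction l with
  | nil => intro s _ _; simp
  | cons z t ih =>
    intro s hnd hns
    have hzs : z ∉ s := hns z (by simp)
    have hadd : PySem.Set.add s z = s ++ [z] := by
      simp [PySem.Set.add, PySem.Set.contains]
      intro hc
      exact absurd hc hzs
    rw [List.foldl_cons, hadd, ih (s ++ [z]) (List.Nodup.of_cons hnd)]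
    · simp
    · intro y hy
      simp only [List.mem_append, List.mem_singleton]
      rintro (hys | rfl)
      · exact hns y (by simp [hy]) hys
      · exact (List.nodup_cons.mp hnd).1 hy

theorem ofList_nodup (l : List Int) (h : l.Nodup) : PySem.Set.ofList l = l := by
  have := foldl_add_nodup l [] h (by simp)
  simpa [PySem.Set.ofList, PySem.Set.empty] using this

-- reversing a mapped range re-indexes from the top
theorem map_range_reverse (g : Nat → Int) (N : Nat) :
    ((List.range N).map g).reverse = (List.range N).map (fun k => g (N - 1 - k)) := by
  apply List.ext_getElem
  · simp
  · intro i h1 h2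
    simp only [List.getElem_reverse, List.length_map, List.length_range, List.getElem_map,
      List.getElem_range]

-- B reduces to the same progression normal form on the natural domain 1 ≤ n
theorem stones_alt_eq_prog (n a b : Int) (hn : 1 ≤ n) : stones_alt n a b = prog n a b := by
  unfold stones_alt prog
  simp only []
  set m := n - 1 with hm
  have hm0 : 0 ≤ m := by omega
  set lo := min a b with hlo
  set d := max a b - lo with hd
  set N := m.toNat + 1 with hN
  have hmN : (m + 1 - 0).toNat = N := by omega
  have hcast : (m.toNat : Int) = m := by omega
  -- the comprehension list, as a map over List.range N
  have hL : (PySem.List.pyRange 0 (m + 1) 1).map (fun i => a * i + b * (m - i))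
      = (List.range N).map (fun k : Nat => a * (k : Int) + b * (m - (k : Int))) := by
    rw [PySem.List.pyRange_one, hmN, List.map_map]
    apply List.map_congr_left
    intro k _
    simp
  rw [hL]
  by_cases hab : a = b
  · -- all splits give the same value a*m: the set collapses to a singleton
    subst hab
    have hconst : ∀ y ∈ (List.range N).map (fun k : Nat => a * (k : Int) + a * (m - (k : Int))), y = a * m := by
      intro y hy
      obtain ⟨k, _, rfl⟩ := List.mem_map.mp hy
      ring
    have hset : PySem.Set.ofList ((List.range N).map (fun k : Nat => a * (k : Int) + a * (m - (k : Int)))) = [a * m] := by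
      rw [hN, List.range_succ_eq_map, List.map_cons, List.map_map]
      have h0 : a * ((0 : Nat) : Int) + a * (m - ((0 : Nat) : Int)) = a * m := by push_cast; ring
      rw [show PySem.Set.ofList = fun xs => List.foldl PySem.Set.add PySem.Set.empty xs from rfl]
      simp only [List.foldl_cons, h0]
      have hadd0 : PySem.Set.add PySem.Set.empty (a * m) = [a * m] := by
        simp [PySem.Set.add, PySem.Set.empty, PySem.Set.contains]
      rw [hadd0]
      apply foldl_add_mem
      intro y hy
      obtain ⟨k, _, rfl⟩ := List.mem_map.mp hy
      simp only [Function.comp_apply]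
      ring
    rw [hset]
    have hd0 : d = 0 := by rw [hd, hlo]; simp
    rw [if_neg (by rw [hd0]; intro h; exact absurd h.1 (lt_irrefl 0))]
    apply PySem.List.sorted_eq_of_perm_of_pairwise_lt
    · simp [hlo]
    · simp
  · -- a ≠ b: all N values are distinct; sorted(set(...)) is the progression
    have hdp : 0 < d := by
      rw [hd, hlo]
      rcases lt_or_gt_of_ne hab with h | h
      · rw [max_eq_right h.le, min_eq_left h.le]; omega
      · rw [max_eq_left h.le, min_eq_right h.le]; omega
    have hnd : ((List.range N).map (fun k : Nat => a * (k : Int) + b * (m - (k : Int)))).Nodup := by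
      apply List.Nodup.map _ (List.nodup_range)
      intro k1 k2 h
      have h2 : ((k1 : Int) - k2) * (a - b) = 0 := by linear_combination h
      have h3 : (k1 : Int) = k2 := by
        rcases mul_eq_zero.mp h2 with h4 | h4
        · omega
        · exfalso; exact hab (by omega)
      exact_mod_cast h3
    rw [ofList_nodup _ hnd]
    have hcnt : (if 0 < d ∧ 0 < m then m.toNat + 1 else 1) = N := by
      by_cases hmp : 0 < m
      · rw [if_pos ⟨hdp, hmp⟩]
      · rw [if_neg (fun h => hmp h.2), hN]
        omega
    rw [hcnt]
    apply PySem.List.sorted_eq_of_perm_of_pairwise_lt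
    · -- the progression is a permutation of the splits list
      rcases lt_or_gt_of_ne hab with hba | hba
      · -- a < b: the splits list is the reversed progression
        have hrev : ((List.range N).map (fun i : Nat => lo * m + (i : Int) * d)).reverse
            = (List.range N).map (fun k : Nat => a * (k : Int) + b * (m - (k : Int))) := by
          rw [map_range_reverse]
          apply List.map_congr_left
          intro k hk
          have hkN : k < N := List.mem_range.mp hk
          have hsub : ((N - 1 - k : Nat) : Int) = m - k := by omega
          rw [hsub, hd, hlo, max_eq_right hba.le, min_eq_left hba.le]
          ring
        have hperm := (List.reverse_perm ((List.range N).map (fun i : Nat => lo * m + (i : Int) * d))).symm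
        rw [hrev] at hperm
        exact hperm
      · -- a > b: the splits list is the progression itself
        have heq : (List.range N).map (fun i : Nat => lo * m + (i : Int) * d)
            = (List.range N).map (fun k : Nat => a * (k : Int) + b * (m - (k : Int))) := by
          apply List.map_congr_left
          intro k _
          rw [hd, hlo, max_eq_left hba.le, min_eq_right hba.le]
          ring
        rw [heq]
    · -- the progression is strictly increasing
      rw [List.pairwise_map]
      apply List.Pairwise.imp _ (List.pairwise_lt_range (n := N))
      intro k1 k2 h
      have : (k1 : Int) * d < k2 * d := by
        apply mul_lt_mul_of_pos_right _ hdp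
        exact_mod_cast h
      linarith

-- ===== VERDICT (by name: the statement is the Claim_ definition above) =====
theorem stones_spec : Claim_equal_stones := by
  intro n a b _ hpre
  unfold Spec_stones
  rw [stones_eq_prog, stones_alt_eq_prog n a b hpre]
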